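-- pv_equiv track=rewrite | github.com/ggulgulia/peridynamics_masters_thesis | Python/peridynamic_boundary_conditions.py | recover_bc_dictonary_with_unique_values
-- ===== SOURCE A (Python) =====
-- def recover_bc_dictonary_with_unique_values(bc_type):
--     """
--     we need to remove duplicates from bc_type dictonary
--     to avoid deleting possible same set of nodes having
--     different boundary conditions eg {'dririclet':0, forceX':1, forceY:1}
--     here 1 refers to node set on right end of domain.
--
--     This routine is needed to recover original grid by removing the
--     ghost layer particles that are applied to the locations where
--     we apply our bounary conditions.
--
--     input data is a dictonary with keys being the name of boundary condition
--     and values being the location and thsese locations might be duplicated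
--     input:
--     ------
--         bc_type : dictonary with boundary conditon data
--
--     output:
--     -------
--         bc_type_new : dictonary with boundary conditon data
--                       with duplicates removed
--     """
--     bc_typ = bc_type.keys()
--     bc_type_new = {}
--     for bct in bc_typ:
--         bc_loc = bc_type[bct]
--         if bc_loc not in bc_type_new.values():
--             bc_type_new[bct] = bc_loc
--
--     return bc_type_new
-- ===== SOURCE B (Python) =====
-- def recover_bc_dictonary_with_unique_values(bc_type):
--     # filter-and-recurse: emit the first pair, discard every later pair carrying
--     # the same value, recurse on what is left (quickselect-style dedup)
--     def go(items):
--         if not items: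
--             return []
--         (k, v) = items[0]
--         return [(k, v)] + go([(k2, v2) for (k2, v2) in items[1:] if v2 != v])
--     return dict(go(list(bc_type.items())))
-- ===== Notes on version B (the rewrite author's own statement) =====
-- stated objective: alternative
-- what changed: Replaces A's accumulator dict with a per-iteration rescan of its values by a recursive filter-and-recurse scheme: emit the head pair and recurse on the tail with all pairs of the same value filtered out, so no result-membership test or accumulator exists at all.
import Mathlib
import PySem

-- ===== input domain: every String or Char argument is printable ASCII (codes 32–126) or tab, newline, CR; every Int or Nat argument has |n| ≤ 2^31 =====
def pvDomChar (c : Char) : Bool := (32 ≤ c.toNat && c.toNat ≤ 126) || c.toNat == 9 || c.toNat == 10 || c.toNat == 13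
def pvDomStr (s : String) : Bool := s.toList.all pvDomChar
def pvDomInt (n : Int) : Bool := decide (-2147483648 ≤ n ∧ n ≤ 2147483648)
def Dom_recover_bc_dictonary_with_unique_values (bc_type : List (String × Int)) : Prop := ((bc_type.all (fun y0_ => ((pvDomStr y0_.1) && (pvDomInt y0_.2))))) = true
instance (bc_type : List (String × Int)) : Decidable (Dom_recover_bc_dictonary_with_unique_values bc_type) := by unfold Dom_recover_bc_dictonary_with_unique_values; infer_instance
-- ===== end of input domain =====

-- B replaces A's accumulator-dict with a value-membership rescan by a recursive
-- filter-and-recurse dedup (emit head, filter its value out of the tail, recurse).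


-- ===== PORT A =====
-- for bct in bc_type.keys(): bc_loc = bc_type[bct]; if bc_loc not in new.values(): new[bct] = bc_loc
def recover_bc_dictonary_with_unique_values (bc_type : List (String × Int)) : List (String × Int) :=
  let d : PySem.Dict String Int := PySem.Dict.mk bc_type
  (d.keys.foldl (fun new bct =>
      match d.get? bct with
      | some bc_loc => if bc_loc ∈ new.values then new else new.insert bct bc_loc
      | none => new)   -- unreachable: bct ranges over d.keys
    PySem.Dict.empty).items

-- ===== PORT B =====
-- def go(items): if not items: return []; (k,v)=items[0]; return [(k,v)] + go([p for p in items[1:] if p[1]!=v])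
def pvGo : List (String × Int) → List (String × Int)
  | [] => []
  | (k, v) :: rest => (k, v) :: pvGo (rest.filter (fun p => p.2 != v))
termination_by l => l.length
decreasing_by
  simp only [List.length_unattach]
  exact Nat.lt_succ_of_le (le_trans (List.length_filter_le _ _) (by simp))

-- return dict(go(list(bc_type.items())))  (go's keys are distinct under Pre_, so dict() is exact here)
def recover_bc_dictonary_with_unique_values_alt (bc_type : List (String × Int)) : List (String × Int) :=
  (PySem.Dict.mk (pvGo bc_type)).items

-- ===== PRECONDITION & SPEC =====
-- Pre_ excludes association lists with duplicate keys: such a list does not represent a Python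
-- dict (the dict collapses duplicates before A ever runs), so behaviour there is a
-- representation artefact of the port, not of A.
def Pre_recover_bc_dictonary_with_unique_values (bc_type : List (String × Int)) : Prop :=
  (bc_type.map Prod.fst).Nodup
instance (bc_type : List (String × Int)) : Decidable (Pre_recover_bc_dictonary_with_unique_values bc_type) := by unfold Pre_recover_bc_dictonary_with_unique_values; infer_instance

def pvWitness_recover_bc_dictonary_with_unique_values : (List (String × Int)) :=
  [("dirichlet", 0), ("forceX", 1), ("forceY", 1)]

def Spec_recover_bc_dictonary_with_unique_values (bc_type : List (String × Int)) (out : List (String × Int)) : Prop := out = recover_bc_dictonary_with_unique_values_alt bc_type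
instance (bc_type : List (String × Int)) (out : List (String × Int)) : Decidable (Spec_recover_bc_dictonary_with_unique_values bc_type out) := by unfold Spec_recover_bc_dictonary_with_unique_values; infer_instance

-- ===== CLAIM (what is proved, stated in full; the proofs are below) =====
def Claim_equal_recover_bc_dictonary_with_unique_values : Prop := ∀ (bc_type : List (String × Int)), Dom_recover_bc_dictonary_with_unique_values bc_type → Pre_recover_bc_dictonary_with_unique_values bc_type → Spec_recover_bc_dictonary_with_unique_values bc_type (recover_bc_dictonary_with_unique_values bc_type)

-- ===== LEMMAS AND PROOFS =====

-- A's loop over keys-with-lookup is the loop over the pairs themselves, when every pair looks up.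
theorem pvFoldKeys_eq_foldPairs (step : PySem.Dict String Int → String → Int → PySem.Dict String Int)
    (d : PySem.Dict String Int) :
    ∀ (l : List (String × Int)) (acc : PySem.Dict String Int),
      (∀ p ∈ l, d.get? p.1 = some p.2) →
      (l.map Prod.fst).foldl (fun new bct =>
          match d.get? bct with
          | some bc_loc => step new bct bc_loc
          | none => new) acc
        = l.foldl (fun new p => step new p.1 p.2) acc := by
  intro l
  induction l with
  | nil => intro acc _; rfl
  | cons p rest ih =>
    intro acc h
    have hp := h p (List.mem_cons_self ..)
    simp only [List.map_cons, List.foldl_cons, hp]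
    exact ih _ (fun q hq => h q (List.mem_cons_of_mem _ hq))

theorem pvLookup_all (bc_type : List (String × Int))
    (hnd : (bc_type.map Prod.fst).Nodup) :
    ∀ p ∈ bc_type, (PySem.Dict.mk bc_type : PySem.Dict String Int).get? p.1 = some p.2 := by
  intro p hp
  exact PySem.Dict.get?_of_mem_items (d := PySem.Dict.mk bc_type) (by simpa using hp) (by simpa [PySem.Dict.keys] using hnd)

-- values of an insert with a fresh key append
theorem pvValues_insert_fresh (acc : PySem.Dict String Int) (k : String) (v : Int)
    (h : acc.contains k = false) :
    (acc.insert k v).values = acc.values ++ [v] := by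
  simp [PySem.Dict.values, PySem.Dict.items_insert_of_not_contains _ _ h]

-- if x is already among the accumulator's values, pairs with value x are skipped by A's step
theorem pvSkip (x : Int) :
    ∀ (l : List (String × Int)) (acc : PySem.Dict String Int),
      x ∈ acc.values →
      (∀ p ∈ l, acc.contains p.1 = false) →
      (l.map Prod.fst).Nodup →
      l.foldl (fun new p => if p.2 ∈ new.values then new else new.insert p.1 p.2) acc
        = (l.filter (fun p => p.2 != x)).foldl
            (fun new p => if p.2 ∈ new.values then new else new.insert p.1 p.2) acc := by
  intro l
  induction l with
  | nil => intro acc _ _ _; rfl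
  | cons p rest ih =>
    intro acc hx hfresh hnd
    rw [List.map_cons] at hnd
    obtain ⟨hhead, hnd'⟩ := List.nodup_cons.mp hnd
    by_cases hpx : p.2 = x
    · -- skipped by A (value present) and dropped by the filter
      have : (p.2 ∈ acc.values) := hpx ▸ hx
      simp only [List.foldl_cons, List.filter_cons, hpx, bne_self_eq_false]
      rw [if_pos hx, if_neg (by simp)]
      exact ih acc hx (fun q hq => hfresh q (List.mem_cons_of_mem _ hq)) hnd'
    · -- kept by the filter; both sides take the same step
      have hkeep : (p.2 != x) = true := by simpa using hpx
      simp only [List.foldl_cons, List.filter_cons]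
      rw [if_pos hkeep]
      simp only [List.foldl_cons]
      by_cases hv : p.2 ∈ acc.values
      · simp only [if_pos hv]
        exact ih acc hx (fun q hq => hfresh q (List.mem_cons_of_mem _ hq)) hnd'
      · simp only [if_neg hv]
        have hck : acc.contains p.1 = false := hfresh p (List.mem_cons_self ..)
        refine ih (acc.insert p.1 p.2) ?_ ?_ hnd'
        · rw [pvValues_insert_fresh acc p.1 p.2 hck]
          exact List.mem_append_left _ hx
        · intro q hq
          have hq1 : q.1 ≠ p.1 := by
            intro he
            exact hhead (he ▸ List.mem_map.mpr ⟨q, hq, rfl⟩)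
          rw [PySem.Dict.contains_insert]
          simp [hq1, hfresh q (List.mem_cons_of_mem _ hq)]

-- Main invariant: A's fold over fresh keys and fresh values appends exactly pvGo of the list.
theorem pvFold_eq_go :
    ∀ (n : Nat) (l : List (String × Int)) (acc : PySem.Dict String Int),
      l.length ≤ n →
      (∀ p ∈ l, acc.contains p.1 = false) →
      (l.map Prod.fst).Nodup →
      (∀ p ∈ l, p.2 ∉ acc.values) →
      (l.foldl (fun new p => if p.2 ∈ new.values then new else new.insert p.1 p.2) acc).items
        = acc.items ++ pvGo l := by
  intro n
  induction n with
  | zero =>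
    intro l acc hlen _ _ _
    have : l = [] := List.eq_nil_of_length_eq_zero (Nat.le_zero.mp hlen)
    subst this; simp [pvGo]
  | succ n ih =>
    intro l acc hlen hfresh hnd hvals
    match l with
    | [] => simp [pvGo]
    | (k, v) :: rest =>
      rw [List.map_cons] at hnd
      obtain ⟨hhead, hnd'⟩ := List.nodup_cons.mp hnd
      have hvacc : v ∉ acc.values := hvals (k, v) (List.mem_cons_self ..)
      have hck : acc.contains k = false := hfresh (k, v) (List.mem_cons_self ..)
      simp only [List.foldl_cons, if_neg hvacc]
      set acc' := acc.insert k v with hacc'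
      have hvacc' : v ∈ acc'.values := by
        rw [hacc', pvValues_insert_fresh acc k v hck]; simp
      have hfresh' : ∀ p ∈ rest, acc'.contains p.1 = false := by
        intro q hq
        have hq1 : q.1 ≠ k := by
          intro he; exact hhead (he ▸ List.mem_map.mpr ⟨q, hq, rfl⟩)
        rw [hacc', PySem.Dict.contains_insert]
        simp [hq1, hfresh q (List.mem_cons_of_mem _ hq)]
      rw [pvSkip v rest acc' hvacc' hfresh' hnd']
      set rest' := rest.filter (fun p => p.2 != v) with hrest'
      have hsub : rest' ⊆ rest := List.filter_subset' _
      have hres : (rest'.foldl (fun new p => if p.2 ∈ new.values then new else new.insert p.1 p.2) acc').items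
          = acc'.items ++ pvGo rest' := by
        refine ih rest' acc' ?_ ?_ ?_ ?_
        · exact le_trans (List.length_filter_le _ _) (Nat.le_of_succ_le_succ (by simpa using hlen))
        · exact fun q hq => hfresh' q (hsub hq)
        · exact List.Nodup.sublist (List.Sublist.map Prod.fst List.filter_sublist) hnd'
        · intro q hq
          have hq2 : q.2 ≠ v := by
            have := List.of_mem_filter hq
            simpa using this
          rw [hacc', pvValues_insert_fresh acc k v hck]
          simp only [List.mem_append, List.mem_singleton]
          rintro (h1 | h2)
          · exact hvals q (List.mem_cons_of_mem _ (hsub hq)) h1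
          · exact hq2 h2
      rw [hres, hacc', PySem.Dict.items_insert_of_not_contains _ _ hck]
      simp [pvGo, hrest']

-- ===== VERDICT (by name: the statement is the Claim_ definition above) =====
theorem recover_bc_dictonary_with_unique_values_spec : Claim_equal_recover_bc_dictonary_with_unique_values := by
  intro bc_type _ hpre
  unfold Spec_recover_bc_dictonary_with_unique_values
  unfold recover_bc_dictonary_with_unique_values recover_bc_dictonary_with_unique_values_alt
  simp only
  have hkeys : (PySem.Dict.mk bc_type : PySem.Dict String Int).keys = bc_type.map Prod.fst := by
    simp [PySem.Dict.keys]
  rw [hkeys,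
    pvFoldKeys_eq_foldPairs (fun new bct bc_loc => if bc_loc ∈ new.values then new else new.insert bct bc_loc)
      (PySem.Dict.mk bc_type) bc_type PySem.Dict.empty (pvLookup_all bc_type hpre)]
  rw [pvFold_eq_go bc_type.length bc_type PySem.Dict.empty le_rfl
      (by intro q _; simp [PySem.Dict.contains_empty])
      hpre
      (by intro q _ h; simp [PySem.Dict.values, PySem.Dict.empty] at h)]
  simp [PySem.Dict.empty]
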